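-- pv_equiv track=rewrite | github.com/jprice8/interview-prep | arrays/fillTheTruck.py | fillTruck
-- ===== SOURCE A (Python) =====
-- def fillTruck(boxTypes, truckSize):
--     boxTypes = sorted(boxTypes, key=lambda x: x[1], reverse=True)
--     totalUnits = 0
--     i = 0
--     while i < len(boxTypes) and truckSize > 0:
--         totalUnits += min(truckSize, boxTypes[i][0]) * boxTypes[i][1]
--
--         truckSize -= boxTypes[i][0]
--         i += 1
--
--     return totalUnits
-- ===== SOURCE B (Python) =====
-- def fillTruck(boxTypes, truckSize):
--     # Lazy greedy: repeatedly extract the current max-unit box type instead of fully sorting.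
--     remaining = list(boxTypes)
--     totalUnits = 0
--     while remaining and truckSize > 0:
--         best = max(remaining, key=lambda b: b[1])
--         remaining.remove(best)
--         totalUnits += min(truckSize, best[0]) * best[1]
--         truckSize -= best[0]
--     return totalUnits
-- ===== Notes on version B (the rewrite author's own statement) =====
-- stated objective: alternative
-- what changed: B replaces A's full stable sort followed by an indexed scan with a lazy greedy loop that repeatedly extracts the current max-unit box type (max + remove) from the unsorted list, never ordering the unused tail.
import Mathlib
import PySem

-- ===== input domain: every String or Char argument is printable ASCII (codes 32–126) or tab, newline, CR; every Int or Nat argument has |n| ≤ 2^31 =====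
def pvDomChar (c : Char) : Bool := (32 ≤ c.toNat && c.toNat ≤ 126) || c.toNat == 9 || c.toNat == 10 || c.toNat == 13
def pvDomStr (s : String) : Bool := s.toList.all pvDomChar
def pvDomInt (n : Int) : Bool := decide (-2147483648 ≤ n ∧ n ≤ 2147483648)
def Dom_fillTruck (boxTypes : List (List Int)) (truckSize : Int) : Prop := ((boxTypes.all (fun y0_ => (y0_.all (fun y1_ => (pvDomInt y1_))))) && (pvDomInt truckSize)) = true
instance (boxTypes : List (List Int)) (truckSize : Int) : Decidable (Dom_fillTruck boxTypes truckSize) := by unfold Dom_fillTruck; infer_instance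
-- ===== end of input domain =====

-- B replaces A's full sort-then-scan by a lazy greedy that repeatedly extracts the current
-- max-unit box type (objective: alternative traversal; not claimed faster).

-- ===== PORT A =====
-- the while loop: i-indexed scan over the sorted list, stopping when truckSize ≤ 0
def fillTruckGo : List (List Int) → Int → Int → Int
  | [], _, totalUnits => totalUnits
  | b :: rest, truckSize, totalUnits =>
    if truckSize > 0 then
      fillTruckGo rest (truckSize - PySem.List.pyGetD b 0 0)
        (totalUnits + min truckSize (PySem.List.pyGetD b 0 0) * PySem.List.pyGetD b 1 0)
    else totalUnits

def fillTruck (boxTypes : List (List Int)) (truckSize : Int) : Int :=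
  fillTruckGo (PySem.List.sorted boxTypes (fun x => PySem.List.pyGetD x 1 0) true) truckSize 0

-- ===== PORT B =====
-- the while loop: fuel = |remaining|; max(...) is PySem.List.max? (first maximal element),
-- remaining.remove(best) is List.erase (exact for a member, remove?_eq_some_erase)
def fillTruckSel : Nat → List (List Int) → Int → Int → Int
  | 0, _, _, totalUnits => totalUnits
  | fuel + 1, remaining, truckSize, totalUnits =>
    if remaining ≠ [] ∧ truckSize > 0 then
      match PySem.List.max? remaining (fun b => PySem.List.pyGetD b 1 0) with
      | none => totalUnits
      | some best =>
        fillTruckSel fuel (remaining.erase best)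
          (truckSize - PySem.List.pyGetD best 0 0)
          (totalUnits + min truckSize (PySem.List.pyGetD best 0 0) * PySem.List.pyGetD best 1 0)
    else totalUnits

def fillTruck_alt (boxTypes : List (List Int)) (truckSize : Int) : Int :=
  fillTruckSel boxTypes.length boxTypes truckSize 0

-- ===== PRECONDITION & SPEC =====
-- Pre_ excludes only inputs on which A raises: a box with fewer than 2 entries makes
-- A's sort key x[1] (or x[0] in the loop) raise IndexError; B raises there too.
def Pre_fillTruck (boxTypes : List (List Int)) (truckSize : Int) : Prop :=
  ∀ b ∈ boxTypes, 2 ≤ b.length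
instance (boxTypes : List (List Int)) (truckSize : Int) : Decidable (Pre_fillTruck boxTypes truckSize) := by unfold Pre_fillTruck; infer_instance
def pvWitness_fillTruck : List (List Int) × Int := ([[1, 3], [2, 2], [3, 1]], 4)

def Spec_fillTruck (boxTypes : List (List Int)) (truckSize : Int) (out : Int) : Prop := out = fillTruck_alt boxTypes truckSize
instance (boxTypes : List (List Int)) (truckSize : Int) (out : Int) : Decidable (Spec_fillTruck boxTypes truckSize out) := by unfold Spec_fillTruck; infer_instance

-- ===== CLAIM (what is proved, stated in full; the proofs are below) =====
def Claim_equal_fillTruck : Prop := ∀ (boxTypes : List (List Int)) (truckSize : Int), Dom_fillTruck boxTypes truckSize → Pre_fillTruck boxTypes truckSize → Spec_fillTruck boxTypes truckSize (fillTruck boxTypes truckSize)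

-- ===== LEMMAS AND PROOFS =====

-- Appending one element to the input of a stable descending insertion sort inserts it.
theorem pvSortedRev_append_singleton {α : Type} (key : α → Int) (ys : List α) (x : α) :
    PySem.List.sorted (ys ++ [x]) key true =
      PySem.List.insertBy (fun a b => decide (key b < key a)) x (PySem.List.sorted ys key true) := by
  rw [PySem.List.sorted_rev_eq_foldl_insertBy, PySem.List.sorted_rev_eq_foldl_insertBy,
    List.foldl_append]
  rfl

theorem pvInsertBy_cons {α : Type} (bf : α → α → Bool) (x y : α) (l : List α) :
    PySem.List.insertBy bf x (y :: l) =
      if bf x y then x :: y :: l else y :: PySem.List.insertBy bf x l := by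
  simp [PySem.List.insertBy]

theorem pvMax?_append_singleton {α : Type} (key : α → Int) (ys : List α) (x : α) :
    PySem.List.max? (ys ++ [x]) key =
      match PySem.List.max? ys key with
      | none => some x
      | some n => if key n < key x then some x else some n := by
  unfold PySem.List.max?
  rw [List.foldl_append]
  rfl

-- The stable descending sort starts with the FIRST maximal element, followed by the
-- stable descending sort of the list with that element erased (selection step).
theorem pvSortedRev_selection {α : Type} [BEq α] [LawfulBEq α] (key : α → Int) :
    ∀ (xs : List α) (m : α), PySem.List.max? xs key = some m →
      PySem.List.sorted xs key true = m :: PySem.List.sorted (xs.erase m) key true := by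
  intro xs
  induction xs using List.reverseRecOn with
  | nil => intro m h; simp [PySem.List.max?] at h
  | append_singleton ys x ih =>
    intro m h
    rw [pvMax?_append_singleton] at h
    cases hys : PySem.List.max? ys key with
    | none =>
      have hnil : ys = [] := (PySem.List.max?_eq_none_iff ys key).mp hys
      subst hnil
      simp only [hys] at h
      injection h with h
      subst h
      simp [PySem.List.sorted, PySem.List.insertBy]
    | some n =>
      rw [hys] at h
      have h : (if key n < key x then some x else some n) = some m := h
      by_cases hlt : key n < key x
      · -- the new last element is strictly greater than everything: it goes to the front
        rw [if_pos hlt] at h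
        injection h with h
        subst h
        have hnotmem : x ∉ ys := by
          intro hx
          exact absurd (PySem.List.max?_isMax hys x hx) (by omega)
        rw [List.erase_append_right _ (by simpa using hnotmem), List.erase_cons_head,
          List.append_nil, pvSortedRev_append_singleton]
        cases hs : PySem.List.sorted ys key true with
        | nil =>
          have : ys = [] := (PySem.List.sorted_eq_nil_iff _ _ _).mp hs
          subst this
          simp [PySem.List.max?] at hys
        | cons hd tl =>
          have hhd : hd ∈ ys := (PySem.List.mem_sorted _ _ _ _).mp (by rw [hs]; exact List.mem_cons_self)
          have : key hd ≤ key n := PySem.List.max?_isMax hys hd hhd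
          rw [pvInsertBy_cons]
          simp only [decide_eq_true_eq, if_pos (by omega : key hd < key x)]
      · -- the first maximal element is still the one of ys
        rw [if_neg hlt] at h
        injection h with h
        subst h
        have hmem : n ∈ ys := PySem.List.max?_mem hys
        rw [List.erase_append_left _ (by simpa using hmem),
          pvSortedRev_append_singleton, pvSortedRev_append_singleton, ih n hys,
          pvInsertBy_cons]
        simp only [decide_eq_true_eq, if_neg hlt]

-- The two loops agree: scanning the stable descending sort equals repeated extraction
-- of the first maximal element.
theorem pvGo_eq_sel : ∀ (fuel : Nat) (xs : List (List Int)) (ts tot : Int),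
    xs.length ≤ fuel →
    fillTruckGo (PySem.List.sorted xs (fun x => PySem.List.pyGetD x 1 0) true) ts tot =
      fillTruckSel fuel xs ts tot := by
  intro fuel
  induction fuel with
  | zero =>
    intro xs ts tot hlen
    have : xs = [] := List.eq_nil_of_length_eq_zero (Nat.le_zero.mp hlen)
    subst this
    rfl
  | succ f ih =>
    intro xs ts tot hlen
    cases hmax : PySem.List.max? xs (fun x => PySem.List.pyGetD x 1 0) with
    | none =>
      have : xs = [] := (PySem.List.max?_eq_none_iff _ _).mp hmax
      subst this
      rfl
    | some m =>
      have hne : xs ≠ [] := by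
        intro hnil; subst hnil; simp [PySem.List.max?] at hmax
      have hmem : m ∈ xs := PySem.List.max?_mem hmax
      rw [pvSortedRev_selection _ xs m hmax]
      show (if ts > 0 then _ else tot) = fillTruckSel (f + 1) xs ts tot
      rw [fillTruckSel]
      by_cases hts : ts > 0
      · rw [if_pos hts, if_pos ⟨hne, hts⟩, hmax]
        exact ih _ _ _ (by
          have := List.length_erase_of_mem hmem
          omega)
      · rw [if_neg hts, if_neg (by tauto)]

-- ===== VERDICT (by name: the statement is the Claim_ definition above) =====
theorem fillTruck_spec : Claim_equal_fillTruck := by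
  intro boxTypes truckSize _ _
  unfold Spec_fillTruck fillTruck fillTruck_alt
  exact pvGo_eq_sel boxTypes.length boxTypes truckSize 0 le_rfl
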